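-- pv_equiv track=rewrite | github.com/LuckyIYI/SAD | backends/webgpu_py/sad_shared.py | pack_jump_step
-- ===== SOURCE A (Python) =====
-- def pack_jump_step(step_index: int, width: int, height: int) -> int:
--     max_dim = max(width, height)
--     pow2 = 1
--     while pow2 < max_dim:
--         pow2 <<= 1
--     if pow2 <= 1:
--         return 1
--     stages = pow2.bit_length() - 1
--     stage = min(step_index, max(0, stages - 1))
--     step = pow2 >> (stage + 1)
--     step = max(step, 1)
--     step = min(step, 0xFFFF)
--     return (step << 16) | (step_index & 0xFFFF)
-- ===== SOURCE B (Python) =====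
-- def pack_jump_step(step_index: int, width: int, height: int) -> int:
--     max_dim = max(width, height)
--     if max_dim <= 1:
--         return 1
--     stages = (max_dim - 1).bit_length()
--     stage = min(step_index, stages - 1)
--     step = min(1 << (stages - 1 - stage), 0xFFFF)
--     return (step << 16) | (step_index & 0xFFFF)
-- ===== Notes on version B (the rewrite author's own statement) =====
-- stated objective: simpler
-- what changed: Replaces A's pow2-doubling while-loop with the closed form stages = (max_dim-1).bit_length() and computes the step directly as one shift, dropping the now-redundant max(step,1) and max(0,...) clamps.
import Mathlib
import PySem

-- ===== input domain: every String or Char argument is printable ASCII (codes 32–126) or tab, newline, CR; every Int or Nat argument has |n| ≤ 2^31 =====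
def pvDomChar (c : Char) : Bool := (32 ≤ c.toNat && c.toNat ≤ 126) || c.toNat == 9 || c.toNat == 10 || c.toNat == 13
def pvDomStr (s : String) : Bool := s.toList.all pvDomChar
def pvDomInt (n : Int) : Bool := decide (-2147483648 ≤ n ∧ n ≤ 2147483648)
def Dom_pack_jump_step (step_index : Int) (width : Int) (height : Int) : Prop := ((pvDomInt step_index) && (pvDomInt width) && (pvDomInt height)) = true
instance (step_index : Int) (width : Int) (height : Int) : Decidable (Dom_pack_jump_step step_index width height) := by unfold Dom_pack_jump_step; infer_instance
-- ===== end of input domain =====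

-- B replaces A's power-of-two doubling loop by the closed form 2^bit_length(max_dim-1) and
-- drops the clamps that closed form makes redundant (objective: simpler; return value only).

-- ===== PORT A =====
-- A's `while pow2 < max_dim: pow2 <<= 1` loop; the 0 < pow2 argument only justifies termination.
def growPow2 (max_dim : Int) (pow2 : Int) (hp : 0 < pow2) : Int :=
  if h : pow2 < max_dim then growPow2 max_dim (pow2 <<< (1:Nat)) (by rw [Int.shiftLeft_eq']; norm_num; omega) else pow2
termination_by (max_dim - pow2).toNat
decreasing_by rw [Int.shiftLeft_eq'] at *; norm_num at *; omega

def pack_jump_step (step_index : Int) (width : Int) (height : Int) : Int :=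
  let max_dim := max width height
  let pow2 := growPow2 max_dim 1 one_pos
  if pow2 ≤ 1 then 1
  else
    let stages : Int := (PySem.Int.bitLength pow2 : Int) - 1
    let stage := min step_index (max 0 (stages - 1))
    -- Python raises ValueError on `pow2 >> (stage+1)` when stage + 1 < 0; Pre_ excludes that.
    let step := pow2 >>> (stage + 1).toNat
    let step := max step 1
    let step := min step 0xFFFF
    PySem.Int.bor (step <<< (16:Nat)) (PySem.Int.band step_index 0xFFFF)

-- ===== PORT B =====
def pack_jump_step_alt (step_index : Int) (width : Int) (height : Int) : Int :=
  let max_dim := max width height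
  if max_dim ≤ 1 then 1
  else
    let stages : Int := (PySem.Int.bitLength (max_dim - 1) : Int)
    let stage := min step_index (stages - 1)
    let step := min ((1:Int) <<< (stages - 1 - stage).toNat) 0xFFFF
    PySem.Int.bor (step <<< (16:Nat)) (PySem.Int.band step_index 0xFFFF)

-- ===== PRECONDITION & SPEC =====
-- Pre_ excludes only inputs where A raises ValueError (negative shift): max(width,height) ≥ 2 with step_index ≤ -2.
def Pre_pack_jump_step (step_index : Int) (width : Int) (height : Int) : Prop :=
  max width height ≤ 1 ∨ -1 ≤ step_index
instance (step_index : Int) (width : Int) (height : Int) : Decidable (Pre_pack_jump_step step_index width height) := by unfold Pre_pack_jump_step; infer_instance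
def pvWitness_pack_jump_step : Int × Int × Int := (3, 8, 8)

def Spec_pack_jump_step (step_index : Int) (width : Int) (height : Int) (out : Int) : Prop := out = pack_jump_step_alt step_index width height
instance (step_index : Int) (width : Int) (height : Int) (out : Int) : Decidable (Spec_pack_jump_step step_index width height out) := by unfold Spec_pack_jump_step; infer_instance

-- ===== CLAIM (what is proved, stated in full; the proofs are below) =====
def Claim_equal_pack_jump_step : Prop := ∀ (step_index : Int) (width : Int) (height : Int), Dom_pack_jump_step step_index width height → Pre_pack_jump_step step_index width height → Spec_pack_jump_step step_index width height (pack_jump_step step_index width height)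

-- ===== LEMMAS AND PROOFS =====

-- `2^j < m ↔ j < bit_length (m-1)` for m ≥ 2
lemma pow_lt_iff_lt_bitLength (m : Int) (hm : 2 ≤ m) (j : Nat) :
    (2:Int)^j < m ↔ j < PySem.Int.bitLength (m-1) := by
  have habs : ((m-1).natAbs : Int) = m - 1 := Int.natAbs_of_nonneg (by omega)
  constructor
  · intro h
    by_contra hc
    have hkj : PySem.Int.bitLength (m-1) ≤ j := by omega
    have h1 : (m-1).natAbs < 2 ^ PySem.Int.bitLength (m-1) := PySem.Int.lt_two_pow_bitLength (m-1)
    have h2 : (2:Nat) ^ PySem.Int.bitLength (m-1) ≤ 2 ^ j := Nat.pow_le_pow_right (by norm_num) hkj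
    have h3 : (m-1).natAbs < 2 ^ j := lt_of_lt_of_le h1 h2
    have h4 : (m - 1 : Int) < ((2:Nat)^j : Nat) := by rw [← habs]; exact_mod_cast h3
    have h5 : (m - 1 : Int) < (2:Int)^j := by push_cast at h4; exact h4
    omega
  · intro hjk
    have h1 : (2:Nat) ^ (PySem.Int.bitLength (m-1) - 1) ≤ (m-1).natAbs :=
      PySem.Int.two_pow_bitLength_le (m-1) (by omega)
    have h2 : (2:Nat) ^ j ≤ 2 ^ (PySem.Int.bitLength (m-1) - 1) :=
      Nat.pow_le_pow_right (by norm_num) (by omega)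
    have h3 : (2:Nat) ^ j ≤ (m-1).natAbs := le_trans h2 h1
    have h4 : ((2:Nat)^j : Int) ≤ m - 1 := by rw [← habs]; exact_mod_cast h3
    have h5 : (2:Int)^j ≤ m - 1 := by push_cast at h4; exact h4
    omega

-- A's loop, started at p = 2^j, lands on 2^(max j (bit_length (m-1)))
lemma growPow2_eq_pow (m : Int) (hm : 2 ≤ m) :
    ∀ (d : Nat) (p : Int) (hp : 0 < p) (j : Nat), p = 2^j →
      PySem.Int.bitLength (m-1) ≤ j + d →
      growPow2 m p hp = 2 ^ (max j (PySem.Int.bitLength (m-1))) := by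
  intro d
  induction d with
  | zero =>
    intro p hp j hpj hk
    rw [growPow2]
    have hnot : ¬ p < m := by
      rw [hpj, pow_lt_iff_lt_bitLength m hm]; omega
    rw [dif_neg hnot, hpj, max_eq_left (by omega)]
  | succ d ih =>
    intro p hp j hpj hk
    rw [growPow2]
    by_cases hlt : p < m
    · rw [dif_pos hlt]
      have hnext : p <<< (1:Nat) = 2 ^ (j+1) := by
        rw [Int.shiftLeft_eq', hpj]; push_cast; ring
      have hj1 : j < PySem.Int.bitLength (m-1) := by
        rw [← pow_lt_iff_lt_bitLength m hm, ← hpj]; exact hlt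
      rw [ih (p <<< (1:Nat)) _ (j+1) hnext (by omega)]
      rw [max_eq_right (by omega), max_eq_right (by omega)]
    · rw [dif_neg hlt, hpj]
      have : PySem.Int.bitLength (m-1) ≤ j := by
        by_contra hc
        exact hlt (by rw [hpj] at *; exact (pow_lt_iff_lt_bitLength m hm j).2 (by omega))
      rw [max_eq_left this]

lemma bitLength_two_pow (k : Nat) : PySem.Int.bitLength ((2:Int)^k) = k + 1 := by
  have habs : ((2:Int)^k).natAbs = 2^k := by
    rw [Int.natAbs_pow]; norm_num
  have h1 := PySem.Int.lt_two_pow_bitLength ((2:Int)^k)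
  have h2 := PySem.Int.two_pow_bitLength_le ((2:Int)^k) (by positivity)
  rw [habs] at h1 h2
  have hk : k < PySem.Int.bitLength ((2:Int)^k) :=
    (Nat.pow_lt_pow_iff_right (by norm_num)).1 h1
  have hk2 : PySem.Int.bitLength ((2:Int)^k) - 1 ≤ k :=
    (Nat.pow_le_pow_iff_right (by norm_num)).1 h2
  omega

lemma bitLength_pos (m : Int) (hm : 2 ≤ m) : 1 ≤ PySem.Int.bitLength (m-1) := by
  by_contra hc
  have h0 : PySem.Int.bitLength (m-1) = 0 := by omega
  have h1 := PySem.Int.lt_two_pow_bitLength (m-1)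
  rw [h0, pow_zero] at h1
  have : (m-1).natAbs = 0 := by omega
  have : m - 1 = 0 := Int.natAbs_eq_zero.1 this
  omega

lemma int_two_pow_shiftRight (k s : Nat) (h : s ≤ k) : ((2:Int)^k) >>> s = 2^(k-s) := by
  have hc : ((2:Int)^k) = (((2^k : Nat)):Int) := by push_cast; ring
  rw [hc]
  show ((2^k >>> s : Nat):Int) = _
  rw [Nat.shiftRight_eq_div_pow, Nat.pow_div h (by norm_num)]
  push_cast; ring

lemma int_one_shiftLeft (n : Nat) : (1:Int) <<< n = 2^n := by
  rw [Int.shiftLeft_eq']; push_cast; ring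

-- ===== VERDICT (by name: the statement is the Claim_ definition above) =====
theorem pack_jump_step_spec : Claim_equal_pack_jump_step := by
  intro si w h _ hpre
  unfold Spec_pack_jump_step pack_jump_step pack_jump_step_alt
  set m := max w h with hm
  by_cases hm1 : m ≤ 1
  · have hgrow : growPow2 m 1 one_pos = 1 := by
      rw [growPow2, dif_neg (by omega)]
    simp only [hgrow, if_pos (le_refl (1:Int)), if_pos hm1]
  · have hm2 : 2 ≤ m := by omega
    have hsi : -1 ≤ si := by
      rcases hpre with h1 | h1
      · omega
      · exact h1
    set k := PySem.Int.bitLength (m-1) with hkdef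
    have hk1 : 1 ≤ k := bitLength_pos m hm2
    have hgrow : growPow2 m 1 one_pos = 2 ^ k := by
      have := growPow2_eq_pow m hm2 k 1 one_pos 0 (by norm_num) (by omega)
      rw [this, max_eq_right (by omega)]
    have hpow_gt : ¬ ((2:Int)^k ≤ 1) := by
      have : (2:Int)^1 ≤ 2^k := pow_le_pow_right₀ (by norm_num) hk1
      norm_num at this; omega
    simp only [hgrow, if_neg hpow_gt, if_neg hm1, bitLength_two_pow k]
    rw [← hkdef]
    push_cast
    have e1 : ((k:Int) + 1 - 1 - 1 : Int) = (k:Int) - 1 := by ring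
    rw [e1]
    have hmax : max (0:Int) ((k:Int) - 1) = (k:Int) - 1 := by
      have : (1:Int) ≤ (k:Int) := by exact_mod_cast hk1
      exact max_eq_right (by omega)
    rw [hmax]
    set t := min si ((k:Int) - 1) with ht
    have htlb : -1 ≤ t := by
      rcases le_total si ((k:Int)-1) with hc | hc
      · rw [ht, min_eq_left hc]; omega
      · have : (1:Int) ≤ (k:Int) := by exact_mod_cast hk1
        rw [ht, min_eq_right hc]; omega
    have htub : t ≤ (k:Int) - 1 := min_le_right _ _
    set s := (t + 1).toNat with hs
    have hsk : s ≤ k := by omega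
    rw [int_two_pow_shiftRight k s hsk]
    have hBexp : ((k:Int) - 1 - t).toNat = k - s := by omega
    rw [hBexp, int_one_shiftLeft]
    have hge1 : (1:Int) ≤ 2 ^ (k - s) := one_le_pow₀ (by norm_num)
    rw [max_eq_left hge1]
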